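-- pv_equiv track=rewrite | github.com/dawn0815/UniSA | t5.py | context_split
-- ===== SOURCE A (Python) =====
-- def context_split(c_num, c_index, c_list):
--     if c_num == 1:
--         return "nocontext"
--     else:
--         a = ""
--         start = max(0, c_index - 5)  # start of context
--         end = min(c_num, c_index + 6)  # end of context
--         for i in range(start, end):
--             if i==c_index:
--                 a+='<sep>'
--             else:
--                 a += c_list[i]
--     return a
-- ===== SOURCE B (Python) =====
-- def context_split(c_num, c_index, c_list):
--     if c_num == 1:
--         return "nocontext"
--     start = max(0, c_index - 5)
--     end = min(c_num, c_index + 6)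
--     if end <= start:
--         return ""
--     if start <= c_index < end:
--         return "".join(c_list[start:c_index]) + "<sep>" + "".join(c_list[c_index + 1:end])
--     return "".join(c_list[start:end])
-- ===== Notes on version B (the rewrite author's own statement) =====
-- stated objective: simpler
-- what changed: A's single loop with a per-element pivot branch is replaced by computing the same window bounds and then slicing the window into the parts before and after the pivot and joining them (with the pivot's '<sep>' in between), with no per-element branching.
import Mathlib
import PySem

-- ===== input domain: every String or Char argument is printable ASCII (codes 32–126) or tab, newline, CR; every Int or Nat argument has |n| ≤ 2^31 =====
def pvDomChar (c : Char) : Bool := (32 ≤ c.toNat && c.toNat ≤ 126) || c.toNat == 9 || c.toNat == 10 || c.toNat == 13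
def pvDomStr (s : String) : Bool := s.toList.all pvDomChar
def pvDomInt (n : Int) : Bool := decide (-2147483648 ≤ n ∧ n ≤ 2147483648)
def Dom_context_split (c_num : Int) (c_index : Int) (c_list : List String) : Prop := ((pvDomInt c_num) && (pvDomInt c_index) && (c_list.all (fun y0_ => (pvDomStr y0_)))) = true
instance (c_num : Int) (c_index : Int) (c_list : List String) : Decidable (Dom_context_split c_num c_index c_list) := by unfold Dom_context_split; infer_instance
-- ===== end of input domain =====

-- B replaces A's per-element branching loop by a split-and-join around the pivot (simpler decomposition, same cost); equivalence is about the return value.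

-- ===== PORT A =====
def context_split (c_num : Int) (c_index : Int) (c_list : List String) : String :=
  if c_num = 1 then "nocontext"
  else
    let start := max 0 (c_index - 5)
    let stop := min c_num (c_index + 6)
    (PySem.List.pyRange start stop 1).foldl
      (fun a i => if i = c_index then a ++ "<sep>" else a ++ PySem.List.pyGetD c_list i "") ""

-- ===== PORT B =====
def context_split_alt (c_num : Int) (c_index : Int) (c_list : List String) : String :=
  if c_num = 1 then "nocontext"
  else
    let start := max 0 (c_index - 5)
    let stop := min c_num (c_index + 6)
    if stop ≤ start then ""
    else if start ≤ c_index ∧ c_index < stop then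
      PySem.Str.join "" (PySem.List.slice c_list (some start) (some c_index)) ++ "<sep>" ++
        PySem.Str.join "" (PySem.List.slice c_list (some (c_index + 1)) (some stop))
    else
      PySem.Str.join "" (PySem.List.slice c_list (some start) (some stop))

-- ===== PRECONDITION & SPEC =====
-- Pre_ excludes exactly the inputs where A raises IndexError (the window reaches past the end of c_list); it is exactly A's return set.
def Pre_context_split (c_num : Int) (c_index : Int) (c_list : List String) : Prop :=
  c_num = 1 ∨ min c_num (c_index + 6) ≤ max 0 (c_index - 5) ∨
    (if c_index = min c_num (c_index + 6) - 1
      then min c_num (c_index + 6) - 1 ≤ (c_list.length : Int)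
      else min c_num (c_index + 6) ≤ (c_list.length : Int))
instance (c_num : Int) (c_index : Int) (c_list : List String) : Decidable (Pre_context_split c_num c_index c_list) := by unfold Pre_context_split; infer_instance
def pvWitness_context_split : Int × Int × List String := (3, 1, ["a", "b", "c"])

def Spec_context_split (c_num : Int) (c_index : Int) (c_list : List String) (out : String) : Prop := out = context_split_alt c_num c_index c_list
instance (c_num : Int) (c_index : Int) (c_list : List String) (out : String) : Decidable (Spec_context_split c_num c_index c_list out) := by unfold Spec_context_split; infer_instance

-- ===== CLAIM (what is proved, stated in full; the proofs are below) =====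
def Claim_equal_context_split : Prop := ∀ (c_num : Int) (c_index : Int) (c_list : List String), Dom_context_split c_num c_index c_list → Pre_context_split c_num c_index c_list → Spec_context_split c_num c_index c_list (context_split c_num c_index c_list)
-- ===== LEMMAS AND PROOFS =====

-- an empty-separator join is the flattening of the pieces
lemma join_empty_eq_flatten (ps : List (List Char)) : PySem.Chars.join [] ps = ps.flatten := by
  unfold PySem.Chars.join
  induction ps with
  | nil => rfl
  | cons p rest ih => cases rest <;> simp_all [List.intercalate]

-- A's accumulating string loop, at the character-list level
lemma fold_append_toList (g : Int → String) (l : List Int) (acc : String) :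
    (l.foldl (fun a i => a ++ g i) acc).toList
      = acc.toList ++ (l.map (fun i => (g i).toList)).flatten := by
  induction l generalizing acc with
  | nil => simp
  | cons x xs ih => simp [ih, String.toList_append]

-- the window of pyGetD values is the corresponding slice
lemma map_get_eq_slice (c_list : List String) (a b : Int) (h0 : 0 ≤ a) (h1 : 0 ≤ b)
    (h2 : b ≤ (c_list.length : Int)) :
    (PySem.List.pyRange a b 1).map (fun i => PySem.List.pyGetD c_list i "")
      = PySem.List.slice c_list (some a) (some b) := by
  rw [PySem.List.slice_toNat c_list h0 h1]
  by_cases hab : b ≤ a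
  · rw [PySem.List.pyRange_one_eq_nil hab]
    have : b.toNat - a.toNat = 0 := by omega
    simp [this]
  · rw [not_le] at hab
    have ha : a < (c_list.length : Int) := lt_of_lt_of_le hab h2
    rw [PySem.List.pyRange_one_cons hab, List.map_cons,
      PySem.List.pyGetD_eq_getElem c_list "" h0 ha,
      List.drop_eq_getElem_cons (by omega : a.toNat < c_list.length)]
    have hbt : b.toNat - a.toNat = (b.toNat - (a.toNat + 1)) + 1 := by omega
    rw [hbt, List.take_succ_cons]
    have := map_get_eq_slice c_list (a + 1) b (by omega) h1 h2
    rw [PySem.List.slice_toNat c_list (by omega) h1] at this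
    have hsucc : (a + 1).toNat = a.toNat + 1 := by omega
    rw [this, hsucc]
termination_by (b - a).toNat
decreasing_by omega

-- fold over a pivot-free range = join of the slice, at the character-list level
lemma fold_nopivot (c_list : List String) (c_index a b : Int) (h0 : 0 ≤ a) (h1 : 0 ≤ b)
    (h2 : b ≤ (c_list.length : Int)) (hp : ∀ i, a ≤ i → i < b → i ≠ c_index) (acc : String) :
    ((PySem.List.pyRange a b 1).foldl
        (fun s i => if i = c_index then s ++ "<sep>" else s ++ PySem.List.pyGetD c_list i "") acc).toList
      = acc.toList ++ (PySem.Str.join "" (PySem.List.slice c_list (some a) (some b))).toList := by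
  have hbody : (fun (s : String) i => if i = c_index then s ++ "<sep>" else s ++ PySem.List.pyGetD c_list i "")
      = fun s i => s ++ (if i = c_index then "<sep>" else PySem.List.pyGetD c_list i "") := by
    funext s i; by_cases h : i = c_index <;> simp [h]
  have hnil : ("" : String).toList = [] := rfl
  rw [hbody, fold_append_toList, PySem.Str.toList_join, hnil, join_empty_eq_flatten,
    ← map_get_eq_slice c_list a b h0 h1 h2]
  rw [List.map_map]
  congr 1
  refine congrArg List.flatten (List.map_congr_left ?_)
  intro i hi
  rw [PySem.List.mem_pyRange_one] at hi
  simp [hp i hi.1 hi.2]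

-- ===== VERDICT (by name: the statement is the Claim_ definition above) =====
theorem context_split_spec : Claim_equal_context_split := by
  intro c_num c_index c_list _ hpre
  unfold Spec_context_split context_split context_split_alt
  by_cases h1 : c_num = 1
  · simp [h1]
  set s := max 0 (c_index - 5) with hs
  set e := min c_num (c_index + 6) with he
  have hs0 : 0 ≤ s := le_max_left 0 _
  simp only [if_neg h1]
  by_cases hempty : e ≤ s
  · rw [if_pos hempty, PySem.List.pyRange_one_eq_nil hempty]; rfl
  rw [not_le] at hempty
  rw [if_neg (not_le.mpr hempty)]
  unfold Pre_context_split at hpre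
  rw [← hs, ← he] at hpre
  rcases hpre with h | h | h
  · exact absurd h h1
  · omega
  apply String.toList_inj.mp
  by_cases hin : s ≤ c_index ∧ c_index < e
  · rw [if_pos hin]
    have hsplit : PySem.List.pyRange s e 1
        = (PySem.List.pyRange s c_index 1 ++ [c_index]) ++ PySem.List.pyRange (c_index + 1) e 1 := by
      rw [← PySem.List.pyRange_one_singleton,
        ← PySem.List.pyRange_one_append s c_index (c_index + 1) hin.1 (by omega),
        ← PySem.List.pyRange_one_append s (c_index + 1) e (by omega) (by omega)]
    have hkey : c_index ≤ (c_list.length : Int) ∧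
        (e ≤ (c_list.length : Int) ∨ c_index + 1 = e) := by
      by_cases hc : c_index = e - 1
      · rw [if_pos hc] at h; omega
      · rw [if_neg hc] at h; omega
    have hpre1 : ∀ i, s ≤ i → i < c_index → i ≠ c_index := by intro i _ hi; omega
    rw [hsplit, List.foldl_append, List.foldl_append, List.foldl_cons, List.foldl_nil,
      if_pos (rfl : c_index = c_index)]
    rcases hkey.2 with hlen | hend
    · rw [fold_nopivot c_list c_index (c_index + 1) e (by omega) (by omega) (by omega)
        (fun i hi _ => by omega) _, String.toList_append,
        fold_nopivot c_list c_index s c_index hs0 (by omega) (by omega) hpre1 ""]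
      simp [String.toList_append, List.append_assoc]
    · rw [hend, PySem.List.pyRange_one_eq_nil (le_refl e), List.foldl_nil, String.toList_append,
        fold_nopivot c_list c_index s c_index hs0 (by omega) hkey.1 hpre1 ""]
      have hslice : PySem.List.slice c_list (some e) (some e) = ([] : List String) := by
        rw [PySem.List.slice_toNat c_list (by omega) (by omega)]; simp
      simp [hslice, String.toList_append, PySem.Str.join, PySem.Chars.join, List.intercalate]
  · rw [if_neg hin]
    have hne : c_index ≠ e - 1 := by
      intro hc; exact hin ⟨by omega, by omega⟩
    rw [if_neg hne] at h
    rw [fold_nopivot c_list c_index s e hs0 (by omega) h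
      (fun i hi1 hi2 => by rcases not_and_or.mp hin with hl | hr <;> omega) ""]
    simp
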